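-- pv_equiv track=rewrite | github.com/ZhuTechLLC/TRQuantExt | .backups/backup-2025-12-05T07-35-01-748Z/dashboard/dashboard_server.py | _convert_links
-- ===== SOURCE A (Python) =====
-- def _convert_links(text: str) -> str:
--     """将 [text](url) 转为链接"""
--     result = ""
--     i = 0
--     while i < len(text):
--         if text[i] == "[":
--             end = text.find("]", i)
--             if end != -1 and end + 1 < len(text) and text[end+1] == "(":
--                 close = text.find(")", end+2)
--                 if close != -1:
--                     label = text[i+1:end]
--                     url = text[end+2:close]
--                     result += f'<a href="{url}" target="_blank">{label}</a>'
--                     i = close + 1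
--                     continue
--         result += text[i]
--         i += 1
--     return result
-- ===== SOURCE B (Python) =====
-- def _convert_links(text: str) -> str:
--     """将 [text](url) 转为链接 — find-jump scan over bracket candidates, joined chunk list."""
--     chunks = []
--     i = 0
--     while True:
--         b = text.find("[", i)
--         if b == -1:
--             chunks.append(text[i:])
--             return "".join(chunks)
--         e = text.find("]", b)
--         if e != -1 and e + 1 < len(text) and text[e + 1] == "(":
--             c = text.find(")", e + 2)
--             if c != -1:
--                 chunks.append(text[i:b])
--                 chunks.append(f'<a href="{text[e+2:c]}" target="_blank">{text[b+1:e]}</a>')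
--                 i = c + 1
--                 continue
--         chunks.append(text[i:b + 1])
--         i = b + 1
-- ===== Notes on version B (the rewrite author's own statement) =====
-- stated objective: faster
-- what changed: A scans character by character, appending to a growing result string at every index; B jumps directly between opening-bracket candidates with str.find, copies the intervening text as whole slices into a chunk list and joins it once at the end.
import Mathlib
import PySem

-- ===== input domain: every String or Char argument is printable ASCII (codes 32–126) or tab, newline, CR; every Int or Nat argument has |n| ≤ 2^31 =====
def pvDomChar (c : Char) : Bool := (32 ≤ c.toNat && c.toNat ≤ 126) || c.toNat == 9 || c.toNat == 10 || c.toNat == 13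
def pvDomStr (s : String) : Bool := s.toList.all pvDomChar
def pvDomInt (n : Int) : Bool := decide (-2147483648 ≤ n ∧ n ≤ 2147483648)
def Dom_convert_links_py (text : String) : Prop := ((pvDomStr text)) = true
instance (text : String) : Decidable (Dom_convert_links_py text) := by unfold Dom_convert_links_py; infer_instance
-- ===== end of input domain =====

-- B replaces A's character-by-character scan/concatenation with a find()-jump scan that
-- copies whole chunks between opening-bracket candidates into a list joined once at the end
-- (objective: faster — a timing run measured B well above 1.5x faster on large inputs).

-- helper (used by the ports' bound proofs): a successful findFrom with a nonempty needle
-- lands at or after the start position and strictly inside the list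
theorem pvFindFrom_bounds (cs sub : List Char) (hsub : sub ≠ []) (k : Nat) (hk : k ≤ cs.length)
    (h : PySem.Chars.findFrom cs sub (k:Int) ≠ -1) :
    k ≤ (PySem.Chars.findFrom cs sub (k:Int)).toNat ∧
    (PySem.Chars.findFrom cs sub (k:Int)).toNat < cs.length ∧
    0 ≤ PySem.Chars.findFrom cs sub (k:Int) := by
  obtain ⟨h1, h2, -⟩ := PySem.Chars.findFrom_natCast_spec cs sub k hk h
  have h0 : (0:Int) ≤ PySem.Chars.findFrom cs sub (k:Int) := le_trans (by positivity) h1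
  refine ⟨by omega, ?_, h0⟩
  have hne : (cs.drop (PySem.Chars.findFrom cs sub (k:Int)).toNat) ≠ [] := by
    intro hnil; rw [hnil] at h2; exact hsub (List.prefix_nil.mp h2)
  have := List.drop_eq_nil_iff.not.mp hne
  omega

-- named intermediate values of both Pythons: e = text.find("]", b), close = text.find(")", e+2),
-- b = text.find("[", i)
def pvE (cs : List Char) (b : Int) : Int := PySem.Chars.findFrom cs [']'] b
def pvClose (cs : List Char) (b : Int) : Int := PySem.Chars.findFrom cs [')'] (pvE cs b + 2)
def pvB (cs : List Char) (i : Nat) : Int := PySem.Chars.findFrom cs ['['] (i:Int)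

-- bounds for the ')' search both ports perform after a successful "](" match at position b
-- (used by the ports' termination proofs)
theorem pvCloseBounds (cs : List Char) (b : Int) (h0 : 0 ≤ b) (hblen : b < cs.length)
    (he1 : pvE cs b ≠ -1) (he2 : pvE cs b + 1 < cs.length) (hc : pvClose cs b ≠ -1) :
    0 ≤ pvClose cs b ∧ b < pvClose cs b ∧ (pvClose cs b).toNat + 1 ≤ cs.length := by
  unfold pvClose pvE at *
  rw [show b = ((b.toNat : Nat) : Int) by omega] at he1 he2 hc ⊢
  obtain ⟨hje, helen, he0⟩ := pvFindFrom_bounds cs [']'] (by simp) b.toNat (by omega) he1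
  set e := PySem.Chars.findFrom cs [']'] ((b.toNat : Nat) : Int) with hedef
  have hcast : e + 2 = ((e.toNat + 2 : Nat) : Int) := by omega
  rw [hcast] at hc ⊢
  obtain ⟨h1, h2, h3⟩ := pvFindFrom_bounds cs [')'] (by simp) (e.toNat + 2) (by omega) hc
  omega

-- '<a href="{url}" target="_blank">{label}</a>' (the f-string both Pythons build)
def pvMkAnchor (url label : List Char) : List Char :=
  "<a href=\"".toList ++ url ++ "\" target=\"_blank\">".toList ++ label ++ "</a>".toList

-- ===== PORT A ===== (literal port of A's while loop: index i, growing result string)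
def pvLoopA (cs : List Char) (result : List Char) (i : Nat) : List Char :=
  if h : i < cs.length then
    if cs[i] = '[' then
      if he : pvE cs (i:Int) ≠ -1 ∧ pvE cs (i:Int) + 1 < cs.length ∧
          PySem.List.pyGet? cs (pvE cs (i:Int) + 1) = some '(' then
        if hc : pvClose cs (i:Int) ≠ -1 then
          pvLoopA cs
            (result ++ pvMkAnchor (PySem.List.slice cs (some (pvE cs (i:Int) + 2)) (some (pvClose cs (i:Int))))
              (PySem.List.slice cs (some ((i:Int) + 1)) (some (pvE cs (i:Int)))))
            ((pvClose cs (i:Int)).toNat + 1)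
        else pvLoopA cs (result ++ [cs[i]]) (i + 1)
      else pvLoopA cs (result ++ [cs[i]]) (i + 1)
    else pvLoopA cs (result ++ [cs[i]]) (i + 1)
  else result
termination_by cs.length - i
decreasing_by
  · have := pvCloseBounds cs (i:Int) (by positivity) (by exact_mod_cast h) he.1 he.2.1 hc
    omega
  · omega
  · omega
  · omega

def convert_links_py (text : String) : String :=
  String.ofList (pvLoopA text.toList [] 0)

-- ===== PORT B ===== (port of B: find()-jump over '[' candidates, chunk list joined at the end)
def pvLoopB (cs : List Char) (i : Nat) (chunks : List (List Char)) (hi : i ≤ cs.length) : List Char :=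
  -- b = text.find("[", i); if b == -1: chunks.append(text[i:]); return "".join(chunks)
  if hb : pvB cs i = -1 then (chunks ++ [cs.drop i]).flatten
  else
    have hbb := pvFindFrom_bounds cs ['['] (by simp) i hi hb
    if he : pvE cs (pvB cs i) ≠ -1 ∧ pvE cs (pvB cs i) + 1 < cs.length ∧
        PySem.List.pyGet? cs (pvE cs (pvB cs i) + 1) = some '(' then
      if hc : pvClose cs (pvB cs i) ≠ -1 then
        pvLoopB cs ((pvClose cs (pvB cs i)).toNat + 1)
          (chunks ++ [PySem.List.slice cs (some (i:Int)) (some (pvB cs i)),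
            pvMkAnchor (PySem.List.slice cs (some (pvE cs (pvB cs i) + 2)) (some (pvClose cs (pvB cs i))))
              (PySem.List.slice cs (some (pvB cs i + 1)) (some (pvE cs (pvB cs i))))])
          (by
            have := pvCloseBounds cs (pvB cs i) hbb.2.2 (by unfold pvB at *; omega) he.1 he.2.1 hc
            omega)
      else pvLoopB cs ((pvB cs i).toNat + 1) (chunks ++ [PySem.List.slice cs (some (i:Int)) (some (pvB cs i + 1))]) hbb.2.1
    else pvLoopB cs ((pvB cs i).toNat + 1) (chunks ++ [PySem.List.slice cs (some (i:Int)) (some (pvB cs i + 1))]) hbb.2.1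
termination_by cs.length - i
decreasing_by
  · have := pvCloseBounds cs (pvB cs i) hbb.2.2 (by unfold pvB at *; omega) he.1 he.2.1 hc
    unfold pvB at *
    omega
  · unfold pvB at *; omega
  · unfold pvB at *; omega

def convert_links_py_alt (text : String) : String :=
  String.ofList (pvLoopB text.toList 0 [] (Nat.zero_le _))

-- ===== PRECONDITION & SPEC =====
def Spec_convert_links_py (text : String) (out : String) : Prop := out = convert_links_py_alt text
instance (text : String) (out : String) : Decidable (Spec_convert_links_py text out) := by unfold Spec_convert_links_py; infer_instance

-- ===== CLAIM (what is proved, stated in full; the proofs are below) =====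
def Claim_equal_convert_links_py : Prop := ∀ (text : String), Dom_convert_links_py text → Spec_convert_links_py text (convert_links_py text)

-- ===== LEMMAS AND PROOFS =====

theorem pvFindFrom_shift (cs sub : List Char) (i k : Nat) (hik : i + k ≤ cs.length) :
    PySem.Chars.findFrom cs sub ((i:Int) + (k:Int)) =
      if PySem.Chars.findFrom (cs.drop i) sub (k:Int) = -1 then -1
      else (i:Int) + PySem.Chars.findFrom (cs.drop i) sub (k:Int) := by
  rw [show ((i:Int) + (k:Int)) = ((i + k : Nat) : Int) by push_cast; ring]
  rw [PySem.Chars.findFrom_natCast cs sub (i+k) hik,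
      PySem.Chars.findFrom_natCast (cs.drop i) sub k (by simp; omega)]
  rw [List.drop_drop]
  have hf := PySem.Chars.neg_one_le_find (List.drop (i+k) cs) sub
  split_ifs with h1 h2 h3 <;> push_cast <;> omega

theorem pvSingletonPrefixDrop (x : Char) (l : List Char) (m : Nat) :
    [x] <+: l.drop m ↔ l[m]? = some x := by
  rw [← List.head?_drop]
  constructor
  · rintro ⟨t, ht⟩; rw [← ht]; rfl
  · intro h
    cases hd : l.drop m with
    | nil => simp [hd] at h
    | cons a t =>
      rw [hd] at h; simp at h
      exact ⟨t, by simp [h]⟩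

-- the common behaviour both loops implement, expressed on the remaining suffix
def pvHit (s : List Char) : Bool :=
  s[0]? == some '[' && pvE s 0 != -1 && decide (pvE s 0 + 1 < (s.length:Int)) &&
    (PySem.List.pyGet? s (pvE s 0 + 1) == some '(') && (pvClose s 0 != -1)

theorem pvHit_iff (s : List Char) :
    pvHit s = true ↔ (s[0]? = some '[' ∧ pvE s 0 ≠ -1 ∧ pvE s 0 + 1 < (s.length:Int) ∧
      PySem.List.pyGet? s (pvE s 0 + 1) = some '(' ∧ pvClose s 0 ≠ -1) := by
  unfold pvHit
  simp [and_assoc]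

def pvG (s : List Char) : List Char :=
  match s with
  | [] => []
  | c :: t =>
    if pvHit (c :: t) then
      pvMkAnchor (PySem.List.slice (c :: t) (some (pvE (c :: t) 0 + 2)) (some (pvClose (c :: t) 0)))
          (PySem.List.slice (c :: t) (some 1) (some (pvE (c :: t) 0))) ++
        pvG ((c :: t).drop ((pvClose (c :: t) 0).toNat + 1))
    else c :: pvG t
termination_by s.length
decreasing_by
  all_goals simp

theorem pvG_cons_not_bracket (c : Char) (t : List Char) (h : c ≠ '[') :
    pvG (c :: t) = c :: pvG t := by
  rw [pvG, if_neg]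
  intro hhit
  rw [pvHit_iff] at hhit
  exact h (by simpa using hhit.1)

theorem pvG_no_bracket (s : List Char) (h : ∀ c ∈ s, c ≠ '[') : pvG s = s := by
  induction s with
  | nil => rw [pvG]
  | cons c t ih =>
    rw [pvG_cons_not_bracket c t (h c (by simp)), ih (fun x hx => h x (by simp [hx]))]

theorem pvG_append_no_bracket (p s : List Char) (h : ∀ c ∈ p, c ≠ '[') :
    pvG (p ++ s) = p ++ pvG s := by
  induction p with
  | nil => simp
  | cons c t ih =>
    rw [List.cons_append, pvG_cons_not_bracket c (t ++ s) (h c (by simp)),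
      ih (fun x hx => h x (by simp [hx]))]
    simp

theorem pvG_at (cs : List Char) (j : Nat) (hj : j < cs.length) :
    pvG (cs.drop j) =
      if cs[j]? = some '[' ∧ pvE cs (j:Int) ≠ -1 ∧ pvE cs (j:Int) + 1 < cs.length ∧
          PySem.List.pyGet? cs (pvE cs (j:Int) + 1) = some '(' ∧ pvClose cs (j:Int) ≠ -1 then
        pvMkAnchor (PySem.List.slice cs (some (pvE cs (j:Int) + 2)) (some (pvClose cs (j:Int))))
            (PySem.List.slice cs (some ((j:Int) + 1)) (some (pvE cs (j:Int)))) ++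
          pvG (cs.drop ((pvClose cs (j:Int)).toNat + 1))
      else cs[j] :: pvG (cs.drop (j+1)) := by
  have hdj : cs.drop j = cs[j] :: cs.drop (j+1) := List.drop_eq_getElem_cons hj
  have hlen : (cs.drop j).length = cs.length - j := by simp
  have hgj : cs[j]? = some cs[j] := List.getElem?_eq_getElem hj
  have hE : pvE cs (j:Int) = if pvE (cs.drop j) 0 = -1 then -1 else (j:Int) + pvE (cs.drop j) 0 := by
    have h0 : ((j:Int) + ((0:Nat):Int)) = (j:Int) := by simp
    have hsh := pvFindFrom_shift cs [']'] j 0 (by omega)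
    rw [h0] at hsh
    simpa [pvE] using hsh
  have hE0 : (-1:Int) ≤ pvE (cs.drop j) 0 := by
    have h1 : pvE (cs.drop j) 0 = PySem.Chars.find (cs.drop j) [']'] := by
      simp [pvE]
    rw [h1]; exact PySem.Chars.neg_one_le_find _ _
  by_cases hc0 : cs[j] = '['
  case neg =>
    rw [if_neg (by rw [hgj]; simp [hc0])]
    rw [hdj, pvG_cons_not_bracket _ _ hc0]
  case pos =>
  by_cases heL : pvE (cs.drop j) 0 = -1
  case pos =>
    have hEe : pvE cs (j:Int) = -1 := by rw [hE, if_pos heL]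
    rw [if_neg (by simp [hEe]), hdj, pvG, if_neg (by rw [← hdj]; intro hh; rw [pvHit_iff] at hh; exact hh.2.1 heL)]
  case neg =>
  have heL0 : (0:Int) ≤ pvE (cs.drop j) 0 := by omega
  have hEeq : pvE cs (j:Int) = (j:Int) + pvE (cs.drop j) 0 := by rw [hE, if_neg heL]
  by_cases hl3 : pvE (cs.drop j) 0 + 1 < ((cs.drop j).length : Int)
  case neg =>
    have hr3 : ¬ (pvE cs (j:Int) + 1 < (cs.length : Int)) := by
      rw [hEeq]; rw [hlen] at hl3; omega
    rw [if_neg (by intro hh; exact hr3 hh.2.2.1), hdj, pvG,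
      if_neg (by rw [← hdj]; intro hh; rw [pvHit_iff] at hh; exact hl3 hh.2.2.1)]
  case pos =>
  have hl3' : pvE cs (j:Int) + 1 < (cs.length : Int) := by
    rw [hEeq]; rw [hlen] at hl3; omega
  have h4 : PySem.List.pyGet? cs (pvE cs (j:Int) + 1) = PySem.List.pyGet? (cs.drop j) (pvE (cs.drop j) 0 + 1) := by
    have hnn1 : (0:Int) ≤ (j:Int) + pvE (cs.drop j) 0 + 1 := by omega
    have hnn2 : (0:Int) ≤ pvE (cs.drop j) 0 + 1 := by omega
    rw [hEeq, PySem.List.pyGet?_of_nonneg cs hnn1, PySem.List.pyGet?_of_nonneg (cs.drop j) hnn2,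
      List.getElem?_drop]
    congr 1
    omega
  by_cases h4' : PySem.List.pyGet? (cs.drop j) (pvE (cs.drop j) 0 + 1) = some '('
  case neg =>
    rw [if_neg (by intro hh; rw [h4] at hh; exact h4' hh.2.2.2.1), hdj, pvG,
      if_neg (by rw [← hdj]; intro hh; rw [pvHit_iff] at hh; exact h4' hh.2.2.2.1)]
  case pos =>
  have hC : pvClose cs (j:Int) = if pvClose (cs.drop j) 0 = -1 then -1 else (j:Int) + pvClose (cs.drop j) 0 := by
    have hcast : pvE cs (j:Int) + 2 = (j:Int) + (((pvE (cs.drop j) 0).toNat + 2 : Nat):Int) := by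
      rw [hEeq]; push_cast; omega
    have hsh := pvFindFrom_shift cs [')'] j ((pvE (cs.drop j) 0).toNat + 2)
      (by rw [hlen] at hl3; omega)
    unfold pvClose
    rw [hcast, hsh]
    have hc2 : (((pvE (cs.drop j) 0).toNat + 2 : Nat):Int) = pvE (cs.drop j) 0 + 2 := by
      push_cast; omega
    rw [hc2]
  have hCl0 : (-1:Int) ≤ pvClose (cs.drop j) 0 := by
    have hk : (pvE (cs.drop j) 0).toNat + 2 ≤ (cs.drop j).length := by
      push_cast at hl3; omega
    have hnc := PySem.Chars.findFrom_natCast (cs.drop j) [')'] ((pvE (cs.drop j) 0).toNat + 2) hk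
    have hc2 : (((pvE (cs.drop j) 0).toNat + 2 : Nat):Int) = pvE (cs.drop j) 0 + 2 := by
      push_cast; omega
    rw [hc2] at hnc
    have hge := PySem.Chars.neg_one_le_find ((cs.drop j).drop ((pvE (cs.drop j) 0).toNat + 2)) [')']
    unfold pvClose
    rw [hnc]
    split_ifs with h1
    · omega
    · omega
  by_cases hcl : pvClose (cs.drop j) 0 = -1
  case pos =>
    have hCe : pvClose cs (j:Int) = -1 := by rw [hC, if_pos hcl]
    rw [if_neg (by simp [hCe]), hdj, pvG, if_neg (by rw [← hdj]; intro hh; rw [pvHit_iff] at hh; exact hh.2.2.2.2 hcl)]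
  case neg =>
  have hcl0 : (0:Int) ≤ pvClose (cs.drop j) 0 := by omega
  have hCeq : pvClose cs (j:Int) = (j:Int) + pvClose (cs.drop j) 0 := by rw [hC, if_neg hcl]
  have hh0 : (cs.drop j)[0]? = some '[' := by rw [hdj]; simp [hc0]
  have hhit : pvHit (cs.drop j) = true := (pvHit_iff _).mpr ⟨hh0, heL, hl3, h4', hcl⟩
  rw [if_pos ⟨by rw [hgj, hc0], by rw [hEeq]; omega, hl3', by rw [h4]; exact h4', by rw [hCeq]; omega⟩,
    hdj, pvG, if_pos (by rw [← hdj]; exact hhit)]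
  rw [← hdj]
  -- three component equalities
  have hslice1 : PySem.List.slice (cs.drop j) (some (pvE (cs.drop j) 0 + 2)) (some (pvClose (cs.drop j) 0)) =
      PySem.List.slice cs (some (pvE cs (j:Int) + 2)) (some (pvClose cs (j:Int))) := by
    rw [show pvE (cs.drop j) 0 + 2 = (((pvE (cs.drop j) 0).toNat + 2 : Nat):Int) by push_cast; omega,
      show pvClose (cs.drop j) 0 = (((pvClose (cs.drop j) 0).toNat : Nat):Int) by omega,
      show pvE cs (j:Int) + 2 = ((j + (pvE (cs.drop j) 0).toNat + 2 : Nat):Int) by rw [hEeq]; push_cast; omega,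
      show pvClose cs (j:Int) = ((j + (pvClose (cs.drop j) 0).toNat : Nat):Int) by rw [hCeq]; push_cast; omega,
      PySem.List.slice_natCast, PySem.List.slice_natCast, List.drop_drop]
    rw [show (pvClose (cs.drop j) 0).toNat - ((pvE (cs.drop j) 0).toNat + 2) =
        j + (pvClose (cs.drop j) 0).toNat - (j + (pvE (cs.drop j) 0).toNat + 2) by omega,
      show j + ((pvE (cs.drop j) 0).toNat + 2) = j + (pvE (cs.drop j) 0).toNat + 2 by omega]
  have hslice2 : PySem.List.slice (cs.drop j) (some (1:Int)) (some (pvE (cs.drop j) 0)) =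
      PySem.List.slice cs (some ((j:Int) + 1)) (some (pvE cs (j:Int))) := by
    rw [show (j:Int) + 1 = ((j + 1 : Nat):Int) by push_cast; ring,
      show (1:Int) = ((1:Nat):Int) by norm_num,
      show pvE (cs.drop j) 0 = (((pvE (cs.drop j) 0).toNat : Nat):Int) by omega,
      show pvE cs (j:Int) = ((j + (pvE (cs.drop j) 0).toNat : Nat):Int) by rw [hEeq]; push_cast; omega,
      PySem.List.slice_natCast, PySem.List.slice_natCast, List.drop_drop]
    rw [show (pvE (cs.drop j) 0).toNat - 1 = j + (pvE (cs.drop j) 0).toNat - (j + 1) by omega]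
  have hrec : (cs.drop j).drop ((pvClose (cs.drop j) 0).toNat + 1) =
      cs.drop ((pvClose cs (j:Int)).toNat + 1) := by
    rw [List.drop_drop]
    congr 1
    rw [hCeq]
    omega
  rw [hslice1, hslice2, hrec]

theorem pvLoopA_eq (cs : List Char) (i : Nat) (result : List Char) :
    pvLoopA cs result i = result ++ pvG (cs.drop i) := by
  fun_induction pvLoopA cs result i with
  | case1 result i h hbr he hc ih =>
    rw [ih, pvG_at cs i h, if_pos ⟨by rw [List.getElem?_eq_getElem h, hbr], he.1, he.2.1, he.2.2, hc⟩]
    simp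
  | case2 result i h hbr he hc ih =>
    rw [ih, pvG_at cs i h, if_neg (by intro hh; exact hc hh.2.2.2.2)]
    simp
  | case3 result i h hbr he ih =>
    rw [ih, pvG_at cs i h, if_neg (by intro hh; exact he ⟨hh.2.1, hh.2.2.1, hh.2.2.2.1⟩)]
    simp
  | case4 result i h hbr ih =>
    rw [ih, pvG_at cs i h, if_neg (by intro hh; exact hbr (by simpa [List.getElem?_eq_getElem h] using hh.1))]
    simp
  | case5 result i h =>
    rw [List.drop_eq_nil_of_le (by omega), pvG]
    simp

-- facts about the jump to the next '[' at position i + find(text[i:], "[")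
theorem pvJump (cs : List Char) (i : Nat) (hi : i ≤ cs.length) (hb : pvB cs i ≠ -1) :
    (0 ≤ PySem.Chars.find (cs.drop i) ['[']) ∧
    pvB cs i = ((i + (PySem.Chars.find (cs.drop i) ['[']).toNat : Nat) : Int) ∧
    (i + (PySem.Chars.find (cs.drop i) ['[']).toNat < cs.length) ∧
    (∀ c ∈ (cs.drop i).take (PySem.Chars.find (cs.drop i) ['[']).toNat, c ≠ '[') ∧
    cs.drop i = (cs.drop i).take (PySem.Chars.find (cs.drop i) ['[']).toNat ++
      cs.drop (i + (PySem.Chars.find (cs.drop i) ['[']).toNat) ∧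
    PySem.List.slice cs (some (i:Int)) (some (pvB cs i)) =
      (cs.drop i).take (PySem.Chars.find (cs.drop i) ['[']).toNat ∧
    cs[i + (PySem.Chars.find (cs.drop i) ['[']).toNat]? = some '[' := by
  have hnc := PySem.Chars.findFrom_natCast cs ['['] i hi
  have hge := PySem.Chars.neg_one_le_find (cs.drop i) ['[']
  have hf : PySem.Chars.find (cs.drop i) ['['] ≠ -1 := by
    intro h0; rw [pvB, hnc, if_pos h0] at hb; exact hb rfl
  have hf0 : (0:Int) ≤ PySem.Chars.find (cs.drop i) ['['] := by omega
  set f := PySem.Chars.find (cs.drop i) ['['] with hfdef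
  have hBeq : pvB cs i = (i:Int) + f := by rw [pvB, hnc, if_neg hf]
  have hspec := PySem.Chars.find_spec (s := cs.drop i) (sub := ['[']) hf0
  have hhead : cs[i + f.toNat]? = some '[' := by
    have h1 := hspec.1
    rw [List.drop_drop] at h1
    exact (pvSingletonPrefixDrop '[' cs (i + f.toNat)).mp h1
  have hlt : i + f.toNat < cs.length := by
    have h2 := hhead
    rw [List.getElem?_eq_some_iff] at h2
    obtain ⟨h3, -⟩ := h2
    exact h3
  refine ⟨hf0, by rw [hBeq]; push_cast; omega, hlt, ?_, ?_, ?_, hhead⟩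
  · intro c hcmem hceq
    obtain ⟨m, hm, hmg⟩ : ∃ m, m < f.toNat ∧ (cs.drop i)[m]? = some c := by
      rw [List.mem_take_iff_getElem] at hcmem
      obtain ⟨m, hm2, rfl⟩ := hcmem
      exact ⟨m, by omega, by rw [List.getElem?_eq_getElem]⟩
    exact hspec.2 m hm ((pvSingletonPrefixDrop '[' (cs.drop i) m).mpr (by rw [hmg, hceq]))
  · rw [← List.drop_drop]
    exact (List.take_append_drop _ _).symm
  · rw [hBeq, show (i:Int) + f = ((i + f.toNat : Nat) : Int) by push_cast; omega,
      show (i:Int) = ((i:Nat):Int) by norm_num, PySem.List.slice_natCast]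
    congr 1
    omega

-- text[i:b+1] = text[i:b] + [text[b]] for b the next '[' position
theorem pvSliceSucc (cs : List Char) (i : Nat) (hi : i ≤ cs.length) (hb : pvB cs i ≠ -1) :
    PySem.List.slice cs (some (i:Int)) (some (pvB cs i + 1)) =
      (cs.drop i).take (PySem.Chars.find (cs.drop i) ['[']).toNat ++ ['['] := by
  obtain ⟨hf0, hBcast, hlt, hpre, hdecomp, hslice0, hhead⟩ := pvJump cs i hi hb
  rw [hBcast, show (((i + (PySem.Chars.find (cs.drop i) ['[']).toNat : Nat)):Int) + 1 =
      ((i + (PySem.Chars.find (cs.drop i) ['[']).toNat + 1 : Nat) : Int) by push_cast; ring,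
    show (i:Int) = ((i:Nat):Int) by norm_num, PySem.List.slice_natCast,
    show i + (PySem.Chars.find (cs.drop i) ['[']).toNat + 1 - i =
      (PySem.Chars.find (cs.drop i) ['[']).toNat + 1 by omega,
    List.take_add_one]
  congr 1
  rw [List.getElem?_drop, show i + ((PySem.Chars.find (cs.drop i) ['[']).toNat) =
    i + (PySem.Chars.find (cs.drop i) ['[']).toNat by omega, hhead]
  rfl

-- pvG over the chunk up to the next '[' is literal copy
theorem pvGJump (cs : List Char) (i : Nat) (hi : i ≤ cs.length) (hb : pvB cs i ≠ -1) :
    pvG (cs.drop i) = (cs.drop i).take (PySem.Chars.find (cs.drop i) ['[']).toNat ++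
      pvG (cs.drop (i + (PySem.Chars.find (cs.drop i) ['[']).toNat)) := by
  obtain ⟨hfact, hBcast, hlt, hpre, hdecomp, hslice0, hhead⟩ := pvJump cs i hi hb
  conv_lhs => rw [hdecomp]
  exact pvG_append_no_bracket _ _ hpre

theorem pvLoopB_eq (cs : List Char) (i : Nat) (chunks : List (List Char)) (hi : i ≤ cs.length) :
    pvLoopB cs i chunks hi = chunks.flatten ++ pvG (cs.drop i) := by
  fun_induction pvLoopB cs i chunks hi with
  | case1 i chunks hi hb =>
    rw [pvG_no_bracket (cs.drop i) (by
      intro c hcmem hc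
      have hni := (PySem.Chars.findFrom_natCast_eq_neg_one_iff cs ['['] i hi).mp hb
      exact hni ((List.singleton_infix_iff '[' (cs.drop i)).mpr (hc ▸ hcmem)))]
    simp
  | case2 i chunks hi hb hbb he hc ih =>
    obtain ⟨hfact, hBcast, hlt, hpre, hdecomp, hslice0, hhead⟩ := pvJump cs i hi hb
    rw [hBcast] at he hc hslice0
    rw [ih, hBcast, pvGJump cs i hi hb,
      pvG_at cs (i + (PySem.Chars.find (cs.drop i) ['[']).toNat) hlt,
      if_pos ⟨hhead, he.1, he.2.1, he.2.2, hc⟩, hslice0]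
    simp
  | case3 i chunks hi hb hbb he hc ih =>
    obtain ⟨hfact, hBcast, hlt, hpre, hdecomp, hslice0, hhead⟩ := pvJump cs i hi hb
    have hgj : cs[i + (PySem.Chars.find (cs.drop i) ['[']).toNat]'hlt = '[' := by
      have h2 := hhead
      rwa [List.getElem?_eq_getElem hlt, Option.some_inj] at h2
    have hss := pvSliceSucc cs i hi hb
    rw [hBcast] at he hc hss
    rw [ih, hBcast, pvGJump cs i hi hb,
      pvG_at cs (i + (PySem.Chars.find (cs.drop i) ['[']).toNat) hlt,
      if_neg (by intro hh; exact hc hh.2.2.2.2), hss, hgj]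
    simp
    congr 2
    omega
  | case4 i chunks hi hb hbb he ih =>
    obtain ⟨hfact, hBcast, hlt, hpre, hdecomp, hslice0, hhead⟩ := pvJump cs i hi hb
    have hgj : cs[i + (PySem.Chars.find (cs.drop i) ['[']).toNat]'hlt = '[' := by
      have h2 := hhead
      rwa [List.getElem?_eq_getElem hlt, Option.some_inj] at h2
    have hss := pvSliceSucc cs i hi hb
    rw [hBcast] at he hss
    rw [ih, hBcast, pvGJump cs i hi hb,
      pvG_at cs (i + (PySem.Chars.find (cs.drop i) ['[']).toNat) hlt,
      if_neg (by intro hh; exact he ⟨hh.2.1, hh.2.2.1, hh.2.2.2.1⟩),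
      hss, hgj]
    simp
    congr 2
    omega

-- ===== VERDICT (by name: the statement is the Claim_ definition above) =====
theorem convert_links_py_spec : Claim_equal_convert_links_py := by
  intro text _
  unfold Spec_convert_links_py convert_links_py convert_links_py_alt
  rw [pvLoopA_eq, pvLoopB_eq]
  simp
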